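-- pv_equiv track=rewrite | github.com/EvgSkv/logica | compiler/universe.py | FieldValuesAsList
-- ===== SOURCE A (Python) =====
-- import copy
--
-- def FieldValuesAsList(field_values):
--   field_values = copy.deepcopy(field_values)
--   if '__rule_text' in field_values:
--     del field_values['__rule_text']
--   field_values_list = []
--   for i in range(len(field_values)):
--     i = str(i + 1)
--     if i not in field_values:
--       return None  # Error!
--     field_values_list.append(field_values[i])
--   return field_values_list
-- ===== SOURCE B (Python) =====
-- import copy
--
-- def FieldValuesAsList(field_values):
--   field_values = copy.deepcopy(field_values)
--   field_values.pop('__rule_text', None)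
--   n = len(field_values)
--   pos = {str(i): i for i in range(1, n + 1)}
--   slots = [''] * n  # placeholder never escapes: n distinct keys scatter onto all n slots
--   for k, v in field_values.items():
--     i = pos.get(k)
--     if i is None:
--       return None  # Error!
--     slots[i - 1] = v
--   return slots
-- ===== Notes on version B (the rewrite author's own statement) =====
-- stated objective: alternative
-- what changed: Inverts A's gather loop (iterate indices 1..n, look each str(i) up in the dict, append) into a scatter: build the inverse index map {str(i): i} once, then a single pass over the dict's items places each value directly into its output slot, failing on any key outside the map.
import Mathlib
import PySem

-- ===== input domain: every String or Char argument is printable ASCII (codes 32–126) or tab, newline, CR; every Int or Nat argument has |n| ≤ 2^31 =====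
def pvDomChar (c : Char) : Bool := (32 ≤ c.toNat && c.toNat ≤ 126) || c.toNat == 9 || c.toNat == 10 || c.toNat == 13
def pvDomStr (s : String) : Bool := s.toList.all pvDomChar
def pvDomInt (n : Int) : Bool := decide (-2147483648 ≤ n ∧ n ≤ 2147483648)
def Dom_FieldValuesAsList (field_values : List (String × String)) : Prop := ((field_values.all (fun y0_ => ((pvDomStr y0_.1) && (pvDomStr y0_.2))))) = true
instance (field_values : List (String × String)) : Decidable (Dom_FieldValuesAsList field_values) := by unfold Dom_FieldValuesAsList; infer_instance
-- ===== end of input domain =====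

-- B inverts A's gather loop (index i ↦ dict lookup ↦ append) into a scatter: a precomputed
-- inverse index map {str(i): i}, one pass over the dict's items placing each value into its slot.
-- Objective: alternative (same cost, inverse traversal). Return-value equivalence only:
-- A mutates only its own deepcopy, so callers observe nothing.

-- ===== PORT A =====
-- the loop 'for i in range(len(field_values)): i = str(i + 1); if i not in …: return None; ….append(…)'
def fvLoopA (d : PySem.Dict String String) : List Int → List String → Option (List String)
  | [], acc => some acc
  | i :: rest, acc =>
    let s := PySem.Int.toStr (i + 1)
    -- 'field_values[i]' is guarded by the membership test, so the getD default is never used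
    if d.contains s then fvLoopA d rest (acc ++ [d.getD s ""]) else none

def FieldValuesAsList (field_values : List (String × String)) : Option (List String) :=
  let d := PySem.Dict.ofList field_values
  let d := if d.contains "__rule_text" then d.erase "__rule_text" else d
  fvLoopA d (PySem.List.pyRange 0 (d.size : Int) 1) []

-- ===== PORT B =====
-- the loop 'for k, v in field_values.items(): i = pos.get(k); if i is None: return None; slots[i-1] = v'
-- 'slots[i - 1] = v' is exact via List.set: i ∈ pos.values = 1..n, so i-1 is in range and nonnegative
def fvLoopB (pos : PySem.Dict String Int) : List (String × String) → List String → Option (List String)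
  | [], slots => some slots
  | (k, v) :: rest, slots =>
    match pos.get? k with
    | none => none
    | some i => fvLoopB pos rest (slots.set (i - 1).toNat v)

def FieldValuesAsList_alt (field_values : List (String × String)) : Option (List String) :=
  let d := (PySem.Dict.ofList field_values).erase "__rule_text"  -- .pop('__rule_text', None), value discarded
  let n := d.size
  let pos := PySem.Dict.ofList ((PySem.List.pyRange 1 ((n : Int) + 1) 1).map (fun i => (PySem.Int.toStr i, i)))
  fvLoopB pos d.items (List.replicate n "")

-- ===== PRECONDITION & SPEC =====
def Spec_FieldValuesAsList (field_values : List (String × String)) (out : Option (List String)) : Prop := out = FieldValuesAsList_alt field_values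
instance (field_values : List (String × String)) (out : Option (List String)) : Decidable (Spec_FieldValuesAsList field_values out) := by unfold Spec_FieldValuesAsList; infer_instance

-- ===== CLAIM (what is proved, stated in full; the proofs are below) =====
def Claim_equal_FieldValuesAsList : Prop := ∀ (field_values : List (String × String)), Dom_FieldValuesAsList field_values → Spec_FieldValuesAsList field_values (FieldValuesAsList field_values)

-- ===== LEMMAS AND PROOFS =====

-- digit decoding, to prove Nat.toDigits 10 is injective
def fvVal (c : Char) : Nat := c.toNat - 48
def fvDec (l : List Char) : Nat := l.foldl (fun a c => 10 * a + fvVal c) 0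

theorem fvVal_digitChar (k : Nat) (h : k < 10) : fvVal (Nat.digitChar k) = k := by
  interval_cases k <;> rfl

theorem fvCore_append (f : Nat) : ∀ (n : Nat) (ds : List Char),
    Nat.toDigitsCore 10 f n ds = Nat.toDigitsCore 10 f n [] ++ ds := by
  induction f with
  | zero => intro n ds; simp [Nat.toDigitsCore]
  | succ f ih =>
    intro n ds
    simp only [Nat.toDigitsCore]
    by_cases h : n / 10 = 0
    · simp [h]
    · simp only [h, if_false]
      rw [ih (n / 10) ((n % 10).digitChar :: ds), ih (n / 10) [(n % 10).digitChar]]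
      simp

theorem fvDec_append_singleton (xs : List Char) (c : Char) :
    fvDec (xs ++ [c]) = 10 * fvDec xs + fvVal c := by
  simp [fvDec, List.foldl_append]

theorem fvDec_core (f : Nat) : ∀ (n : Nat), n < f → fvDec (Nat.toDigitsCore 10 f n []) = n := by
  induction f with
  | zero => intro n h; omega
  | succ f ih =>
    intro n h
    simp only [Nat.toDigitsCore]
    by_cases h10 : n / 10 = 0
    · have hn : n < 10 := by omega
      simp [h10, fvDec, Nat.mod_eq_of_lt hn, fvVal_digitChar n hn]
    · simp only [h10, if_false]
      rw [fvCore_append f (n / 10) [(n % 10).digitChar], fvDec_append_singleton,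
        ih (n / 10) (by have := Nat.div_lt_self (by omega : 0 < n) (by omega : 1 < 10); omega),
        fvVal_digitChar (n % 10) (by omega)]
      omega

theorem fvToDigits_inj (m n : Nat) (h : Nat.toDigits 10 m = Nat.toDigits 10 n) : m = n := by
  have hm := fvDec_core (m + 1) m (by omega)
  have hn := fvDec_core (n + 1) n (by omega)
  unfold Nat.toDigits at h
  rw [h] at hm
  rw [hn] at hm
  omega

theorem fvToStr_inj (m n : Int) (hm : 0 ≤ m) (hn : 0 ≤ n)
    (h : PySem.Int.toStr m = PySem.Int.toStr n) : m = n := by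
  have h' : PySem.Int.toChars m = PySem.Int.toChars n := by
    rw [← PySem.Int.toList_toStr, ← PySem.Int.toList_toStr, h]
  unfold PySem.Int.toChars at h'
  rw [if_neg (by omega), if_neg (by omega)] at h'
  have := fvToDigits_inj m.toNat n.toNat h'
  omega

-- A's loop, characterised: succeed iff every str(i+1) is a key, returning the lookups in order
theorem fvLoopA_eq (d : PySem.Dict String String) :
    ∀ (l : List Int) (acc : List String),
    fvLoopA d l acc =
      if l.all (fun i => d.contains (PySem.Int.toStr (i + 1))) then
        some (acc ++ l.map (fun i => d.getD (PySem.Int.toStr (i + 1)) ""))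
      else none := by
  intro l
  induction l with
  | nil => intro acc; simp [fvLoopA]
  | cons i rest ih =>
    intro acc
    simp only [fvLoopA, List.all_cons, List.map_cons]
    by_cases h : d.contains (PySem.Int.toStr (i + 1))
    · rw [if_pos h, ih]
      simp [h]
    · simp [h]

-- B's loop, characterised: succeed iff every key is in pos, scattering each value into its slot
theorem fvLoopB_eq (pos : PySem.Dict String Int) :
    ∀ (items : List (String × String)) (slots : List String),
    fvLoopB pos items slots =
      if items.all (fun p => (pos.get? p.1).isSome) then
        some (items.foldl (fun sl p => sl.set ((pos.get? p.1).getD 0 - 1).toNat p.2) slots)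
      else none := by
  intro items
  induction items with
  | nil => intro slots; simp [fvLoopB]
  | cons p rest ih =>
    intro slots
    obtain ⟨k, v⟩ := p
    cases h : pos.get? k with
    | none => simp [fvLoopB, h]
    | some i =>
      simp only [fvLoopB, h, List.all_cons, List.foldl_cons, Option.isSome_some,
        Bool.true_and, Option.getD_some]
      rw [ih]

theorem fvErase_of_not_contains (d : PySem.Dict String String) (k : String)
    (h : d.contains k = false) : d.erase k = d := by
  apply PySem.Dict.ext
  show (d.items.filter fun p => !p.1 == k) = d.items
  apply List.filter_eq_self.2
  intro p hp
  have : ¬ (p.1 == k) = true := by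
    intro hk
    have : d.items.any (fun p => p.1 == k) = true := List.any_eq_true.2 ⟨p, hp, hk⟩
    rw [PySem.Dict.contains] at h
    simp_all
  simp_all

theorem fvKeys_erase_nodup (d : PySem.Dict String String) (k : String)
    (h : d.keys.Nodup) : (d.erase k).keys.Nodup := by
  unfold PySem.Dict.keys at h ⊢
  exact ((List.filter_sublist (l := d.items)).map (fun p => p.1)).nodup h

-- a scatter fold leaves untouched indices alone
theorem fvFold_getElem?_of_not_mem (f : String × String → Nat) :
    ∀ (items : List (String × String)) (sl : List String) (j : Nat),
    j ∉ items.map f →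
    (items.foldl (fun sl p => sl.set (f p) p.2) sl)[j]? = sl[j]? := by
  intro items
  induction items with
  | nil => intro sl j _; rfl
  | cons p rest ih =>
    intro sl j hj
    simp only [List.map_cons, List.mem_cons, not_or] at hj
    rw [List.foldl_cons, ih _ _ hj.2, List.getElem?_set_ne (by exact fun h => hj.1 h.symm)]

-- a scatter fold preserves length
theorem fvFold_length (f : String × String → Nat) :
    ∀ (items : List (String × String)) (sl : List String),
    (items.foldl (fun sl p => sl.set (f p) p.2) sl).length = sl.length := by
  intro items
  induction items with
  | nil => intro sl; rfl
  | cons p rest ih => intro sl; rw [List.foldl_cons, ih]; simp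

-- a scatter fold with pairwise-distinct in-range targets: element j is the unique hit (or untouched)
theorem fvFold_getElem?_of_mem (f : String × String → Nat) :
    ∀ (items : List (String × String)) (sl : List String) (q : String × String),
    (items.map f).Nodup → q ∈ items → f q < sl.length →
    (items.foldl (fun sl p => sl.set (f p) p.2) sl)[f q]? = some q.2 := by
  intro items
  induction items with
  | nil => intro _ _ _ h _; cases h
  | cons p rest ih =>
    intro sl q hnd hq hlt
    simp only [List.map_cons, List.nodup_cons] at hnd
    rw [List.foldl_cons]
    rcases List.mem_cons.1 hq with heq | hq'
    · subst heq
      rw [fvFold_getElem?_of_not_mem f rest _ _ hnd.1, List.getElem?_set_self',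
        List.getElem?_eq_getElem hlt]
      rfl
    · exact ih _ q hnd.2 hq' (by simpa using hlt)

-- the inverse index map: its items are exactly the list it was built from
theorem fvPos_items (n : Nat) :
    (PySem.Dict.ofList ((PySem.List.pyRange 1 ((n : Int) + 1) 1).map (fun i => (PySem.Int.toStr i, i)))).items
      = (PySem.List.pyRange 1 ((n : Int) + 1) 1).map (fun i => (PySem.Int.toStr i, i)) := by
  have h := PySem.Dict.items_foldl_insert_fresh
    ((PySem.List.pyRange 1 ((n : Int) + 1) 1).map (fun i => (PySem.Int.toStr i, i)))
    Prod.fst Prod.snd PySem.Dict.empty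
    (by intro a _; rfl)
    (by
      rw [List.map_map]
      apply List.Nodup.map_on _ (PySem.List.nodup_pyRange_one 1 ((n : Int) + 1))
      intro a ha b hb hab
      have ha' := (PySem.List.mem_pyRange_one.1 ha).1
      have hb' := (PySem.List.mem_pyRange_one.1 hb).1
      exact fvToStr_inj a b (by omega) (by omega) hab)
  simpa using h

theorem fvPos_get_some (n : Nat) (i : Int) (hi : 1 ≤ i) (hi' : i ≤ (n : Int)) :
    (PySem.Dict.ofList ((PySem.List.pyRange 1 ((n : Int) + 1) 1).map (fun i => (PySem.Int.toStr i, i)))).get?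
      (PySem.Int.toStr i) = some i := by
  apply PySem.Dict.get?_of_mem_items _ _ (PySem.Dict.nodup_keys_ofList _)
  rw [fvPos_items]
  exact List.mem_map.2 ⟨i, PySem.List.mem_pyRange_one.2 ⟨hi, by omega⟩, rfl⟩

theorem fvPos_get_inv (n : Nat) (s : String) (i : Int)
    (h : (PySem.Dict.ofList ((PySem.List.pyRange 1 ((n : Int) + 1) 1).map (fun i => (PySem.Int.toStr i, i)))).get? s = some i) :
    s = PySem.Int.toStr i ∧ 1 ≤ i ∧ i ≤ (n : Int) := by
  have hmem : (s, i) ∈ (PySem.Dict.ofList ((PySem.List.pyRange 1 ((n : Int) + 1) 1).map (fun i => (PySem.Int.toStr i, i)))).items :=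
    PySem.Dict.mem_items_of_get?_eq_some _ h
  rw [fvPos_items] at hmem
  obtain ⟨j, hj, hji⟩ := List.mem_map.1 hmem
  have hj' := PySem.List.mem_pyRange_one.1 hj
  obtain ⟨rfl, rfl⟩ : PySem.Int.toStr j = s ∧ j = i := ⟨congrArg Prod.fst hji, congrArg Prod.snd hji⟩
  exact ⟨rfl, hj'.1, by omega⟩

-- main equivalence over any dict with distinct keys
theorem fvMain (d : PySem.Dict String String) (h : d.keys.Nodup) :
    fvLoopA d (PySem.List.pyRange 0 (d.size : Int) 1) [] =
      fvLoopB (PySem.Dict.ofList ((PySem.List.pyRange 1 ((d.size : Int) + 1) 1).map (fun i => (PySem.Int.toStr i, i))))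
        d.items (List.replicate d.size "") := by
  set n := d.size with hn
  set pos := PySem.Dict.ofList ((PySem.List.pyRange 1 ((n : Int) + 1) 1).map (fun i => (PySem.Int.toStr i, i))) with hpos
  set E : List String := (PySem.List.pyRange 1 ((n : Int) + 1) 1).map PySem.Int.toStr with hE
  -- A's range of successors as E
  have hM : (PySem.List.pyRange 0 (n : Int) 1).map (fun i => PySem.Int.toStr (i + 1)) = E := by
    rw [hE, PySem.List.pyRange_one, PySem.List.pyRange_one]
    simp only [List.map_map]
    have : ((n : Int) - 0).toNat = ((n : Int) + 1 - 1).toNat := by omega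
    rw [← this]
    apply List.map_congr_left
    intro k _
    simp only [Function.comp]
    congr 1
    omega
  have hElen : E.length = n := by
    rw [hE, List.length_map, PySem.List.length_pyRange_one]
    omega
  have hKlen : d.keys.length = n := by
    simp [PySem.Dict.keys, PySem.Dict.size, hn]
  have hEnodup : E.Nodup := by
    rw [hE]
    apply List.Nodup.map_on _ (PySem.List.nodup_pyRange_one 1 ((n : Int) + 1))
    intro a ha b hb hab
    have ha' := (PySem.List.mem_pyRange_one.1 ha).1
    have hb' := (PySem.List.mem_pyRange_one.1 hb).1
    exact fvToStr_inj a b (by omega) (by omega) hab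
  have hcont : ∀ s, d.contains s = true ↔ s ∈ d.keys := fun s => PySem.Dict.contains_iff_mem_keys d s
  rw [fvLoopA_eq, fvLoopB_eq]
  have hcondA : (PySem.List.pyRange 0 (n : Int) 1).all (fun i => d.contains (PySem.Int.toStr (i + 1)))
      = E.all (fun s => d.contains s) := by
    rw [← hM, List.all_map]
    rfl
  rw [hcondA]
  by_cases hA : E.all (fun s => d.contains s) = true
  · -- success on both sides
    have hsub : E ⊆ d.keys := fun s hs => (hcont s).1 (List.all_eq_true.1 hA s hs)
    have hperm : E.Perm d.keys := by
      apply List.Subperm.perm_of_length_le (hEnodup.subperm hsub)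
      omega
    -- every item key is in pos
    have hkeyE : ∀ p ∈ d.items, p.1 ∈ E := by
      intro p hp
      exact hperm.symm.subset (List.mem_map.2 ⟨p, hp, rfl⟩)
    have hsome : ∀ p ∈ d.items, (pos.get? p.1).isSome := by
      intro p hp
      obtain ⟨i, hi, hieq⟩ := List.mem_map.1 (hkeyE p hp)
      have hi' := PySem.List.mem_pyRange_one.1 hi
      rw [← hieq, hpos, fvPos_get_some n i hi'.1 (by omega)]
      rfl
    rw [if_pos (List.all_eq_true.2 hsome), if_pos hA]
    congr 1
    -- both lists elementwise
    set f : String × String → Nat := fun p => ((pos.get? p.1).getD 0 - 1).toNat with hf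
    -- f p recovers the index: p.1 = toStr (f p + 1), f p < n
    have hfchar : ∀ p ∈ d.items, p.1 = PySem.Int.toStr ((f p : Int) + 1) ∧ f p < n := by
      intro p hp
      cases hg : pos.get? p.1 with
      | none => exact absurd (hsome p hp) (by simp [hg])
      | some i =>
        obtain ⟨hs, h1, h2⟩ := fvPos_get_inv n p.1 i hg
        refine ⟨?_, ?_⟩
        · rw [hs]; congr 1; simp [hf, hg]; omega
        · simp [hf, hg]; omega
    have hfnodup : (d.items.map f).Nodup := by
      have hkeq : d.keys = d.items.map Prod.fst := rfl
      have hKchar : ∀ k ∈ d.keys, k = PySem.Int.toStr ((((pos.get? k).getD 0 - 1).toNat : Int) + 1) := by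
        intro k hk
        rw [hkeq] at hk
        obtain ⟨p, hp, rfl⟩ := List.mem_map.1 hk
        exact (hfchar p hp).1
      have hmaps : d.items.map f = d.keys.map (fun k => ((pos.get? k).getD 0 - 1).toNat) := by
        rw [hkeq, List.map_map]
        rfl
      rw [hmaps]
      apply List.Nodup.map_on _ h
      intro x hx y hy hxy
      rw [hKchar x hx, hKchar y hy, hxy]
    have hAlist : ([] : List String) ++ (PySem.List.pyRange 0 (n : Int) 1).map (fun i => d.getD (PySem.Int.toStr (i + 1)) "") = E.map (fun s => d.getD s "") := by
      rw [List.nil_append, ← hM, List.map_map]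
      rfl
    rw [hAlist]
    apply List.ext_getElem?
    intro j
    by_cases hj : j < n
    · -- the unique item with key str(j+1)
      have hkey : PySem.Int.toStr ((j : Int) + 1) ∈ d.keys := hsub (by
        rw [hE]
        exact List.mem_map.2 ⟨(j : Int) + 1, PySem.List.mem_pyRange_one.2 ⟨by omega, by omega⟩, rfl⟩)
      obtain ⟨q, hq, hq1⟩ := List.mem_map.1 hkey
      have hfq : f q = j := by
        have hc := hfchar q hq
        have : PySem.Int.toStr ((f q : Int) + 1) = PySem.Int.toStr ((j : Int) + 1) := by
          rw [← hc.1, hq1]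
        have := fvToStr_inj _ _ (by omega) (by omega) this
        omega
      have hqv : d.getD q.1 "" = q.2 := PySem.Dict.getD_of_mem_items d (k := q.1) (v := q.2) hq h ""
      show (E.map (fun s => d.getD s ""))[j]? =
        (List.foldl (fun sl p => sl.set (f p) p.2) (List.replicate n "") d.items)[j]?
      rw [← hfq, fvFold_getElem?_of_mem f d.items _ q hfnodup hq (by rw [List.length_replicate, hfq]; omega)]
      rw [hfq]
      rw [List.getElem?_map, hE]
      rw [List.getElem?_eq_getElem (by rw [List.length_map, PySem.List.length_pyRange_one]; omega)]
      simp only [Option.map_some]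
      rw [List.getElem_map, PySem.List.getElem_pyRange_one]
      rw [show (1 : Int) + (j : Int) = (j : Int) + 1 by omega, ← hq1, hqv]
    · rw [List.getElem?_eq_none (by rw [List.length_map, hElen]; omega),
        List.getElem?_eq_none (by rw [fvFold_length]; rw [List.length_replicate]; omega)]
  · -- failure on both sides
    rw [if_neg hA]
    -- some key of d lies outside E, so pos.get? fails on it
    by_contra hcontra
    have hall : d.items.all (fun p => (pos.get? p.1).isSome) = true := by
      by_contra hna
      rw [if_neg hna] at hcontra
      exact hcontra rfl
    -- then every key is in E, hence keys perm E, hence A's check passes: contradiction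
    have hsub : d.keys ⊆ E := by
      intro s hs
      obtain ⟨p, hp, rfl⟩ := List.mem_map.1 hs
      have := List.all_eq_true.1 hall p hp
      cases hg : pos.get? p.1 with
      | none => rw [hg] at this; simp at this
      | some i =>
        obtain ⟨hseq, h1, h2⟩ := fvPos_get_inv n p.1 i hg
        rw [hseq, hE]
        exact List.mem_map.2 ⟨i, PySem.List.mem_pyRange_one.2 ⟨h1, by omega⟩, rfl⟩
    have hperm : d.keys.Perm E := by
      apply List.Subperm.perm_of_length_le (h.subperm hsub)
      omega
    apply hA
    apply List.all_eq_true.2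
    intro s hs
    exact (hcont s).2 (hperm.symm.subset hs)

-- ===== VERDICT (by name: the statement is the Claim_ definition above) =====
theorem FieldValuesAsList_spec : Claim_equal_FieldValuesAsList := by
  intro fv _
  show FieldValuesAsList fv = FieldValuesAsList_alt fv
  unfold FieldValuesAsList FieldValuesAsList_alt
  have hnodup0 := PySem.Dict.nodup_keys_ofList (κ := String) (ν := String) fv
  set d0 := PySem.Dict.ofList fv with hd0
  have hsame : (if d0.contains "__rule_text" then d0.erase "__rule_text" else d0) = d0.erase "__rule_text" := by
    by_cases hc : d0.contains "__rule_text" = true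
    · rw [if_pos hc]
    · rw [if_neg hc, fvErase_of_not_contains d0 _ (by simpa using hc)]
  simp only [hsame]
  exact fvMain (d0.erase "__rule_text") (fvKeys_erase_nodup d0 _ hnodup0)
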